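-- pv_equiv track=rewrite | github.com/JFincher42/aoc2019 | day24/day24/day24.py | calc_biodiversity
-- ===== SOURCE A (Python) =====
-- import math
--
-- def calc_biodiversity(grid):
--     biodiversity = 0
--     bin = 0
--     for i in range(len(grid)):
--         for j in range(len(grid[i])):
--             if grid[i][j] == "#":
--                 biodiversity += int(math.pow(2, bin))
--             bin += 1
--     return biodiversity
-- ===== SOURCE B (Python) =====
-- def calc_biodiversity(grid):
--     cells = [c for row in grid for c in row]
--     if not cells:
--         return 0
--     return int("".join("1" if c == "#" else "0" for c in reversed(cells)), 2)
-- ===== Notes on version B (the rewrite author's own statement) =====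
-- stated objective: idiomatic
-- what changed: Replaces the nested index loops with float power accumulation by flattening the grid, mapping cells to a reversed binary string and parsing it with int(s,2) (0 for the empty grid).
import Mathlib
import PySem

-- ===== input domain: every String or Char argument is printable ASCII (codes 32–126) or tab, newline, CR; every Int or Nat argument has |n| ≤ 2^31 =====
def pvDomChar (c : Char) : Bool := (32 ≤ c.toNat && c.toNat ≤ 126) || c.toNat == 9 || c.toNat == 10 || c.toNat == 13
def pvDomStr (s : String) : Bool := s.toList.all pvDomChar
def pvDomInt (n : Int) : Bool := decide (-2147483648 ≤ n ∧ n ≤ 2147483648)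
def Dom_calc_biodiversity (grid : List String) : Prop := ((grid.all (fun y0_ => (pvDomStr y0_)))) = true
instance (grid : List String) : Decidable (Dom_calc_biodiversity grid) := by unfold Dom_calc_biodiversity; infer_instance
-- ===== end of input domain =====

-- B flattens the grid and parses a reversed '#'→'1' binary string instead of A's
-- nested loops accumulating float powers of two (idiomatic; same cost).


-- ===== PORT A =====
-- nested loops; biodiversity and the running bit index `bin` carried as a pair.
-- int(math.pow(2, bin)) is exact 2^bin for bin ≤ 1023 (Pre_ keeps us there).
def calc_biodiversity (grid : List String) : Int :=
  (grid.foldl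
    (fun (st : Int × Nat) row =>
      row.toList.foldl
        (fun (st : Int × Nat) c =>
          (if c = '#' then st.1 + 2 ^ st.2 else st.1, st.2 + 1)) st)
    (0, 0)).1

-- ===== PORT B =====
def calc_biodiversity_alt (grid : List String) : Int :=
  let cells := (grid.map String.toList).flatten
  if cells = [] then 0
  else
    -- "".join('1' if c == '#' else '0' for c in reversed(cells)) parsed by int(s, 2)
    ((cells.reverse.map (fun c => if c = '#' then '1' else '0')).foldl
      (fun (acc : Int) c => 2 * acc + (if c = '1' then 1 else 0)) 0)

-- ===== PRECONDITION & SPEC =====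
-- Pre_ excludes exactly the inputs where A raises OverflowError ("math range error"):
-- a '#' cell at flattened index ≥ 1024, where math.pow(2, bin) overflows the float range.
def Pre_calc_biodiversity (grid : List String) : Prop :=
  ∀ p ∈ (grid.map String.toList).flatten.zipIdx, p.1 = '#' → p.2 < 1024
instance (grid : List String) : Decidable (Pre_calc_biodiversity grid) := by
  unfold Pre_calc_biodiversity; infer_instance

def pvWitness_calc_biodiversity : List String := [".#.", "##"]

def Spec_calc_biodiversity (grid : List String) (out : Int) : Prop := out = calc_biodiversity_alt grid
instance (grid : List String) (out : Int) : Decidable (Spec_calc_biodiversity grid out) := by unfold Spec_calc_biodiversity; infer_instance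

-- ===== CLAIM (what is proved, stated in full; the proofs are below) =====
def Claim_equal_calc_biodiversity : Prop := ∀ (grid : List String), Dom_calc_biodiversity grid → Pre_calc_biodiversity grid → Spec_calc_biodiversity grid (calc_biodiversity grid)

-- ===== LEMMAS AND PROOFS =====

-- bit value of a cell list, LSB first
def pvVal : List Char → Int
  | [] => 0
  | c :: t => (if c = '#' then 1 else 0) + 2 * pvVal t

lemma pvA_foldl (l : List Char) (a : Int) (b : Nat) :
    (l.foldl (fun (st : Int × Nat) c =>
        (if c = '#' then st.1 + 2 ^ st.2 else st.1, st.2 + 1)) (a, b)).1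
      = a + 2 ^ b * pvVal l := by
  induction l generalizing a b with
  | nil => simp [pvVal]
  | cons c t ih =>
      simp only [List.foldl_cons, pvVal, ih]
      split_ifs with h <;> ring

lemma pvB_parse (l : List Char) :
    (l.reverse.map (fun c => if c = '#' then '1' else '0')).foldl
      (fun (acc : Int) c => 2 * acc + (if c = '1' then 1 else 0)) 0
      = pvVal l := by
  rw [List.foldl_map, List.foldl_reverse]
  induction l with
  | nil => simp [pvVal]
  | cons c t ih =>
      simp only [List.foldr_cons, pvVal, ih]
      by_cases h : c = '#'
      · simp [h]; ring
      · simp [h]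

-- ===== VERDICT (by name: the statement is the Claim_ definition above) =====
theorem calc_biodiversity_spec : Claim_equal_calc_biodiversity := by
  intro grid _ _
  unfold Spec_calc_biodiversity calc_biodiversity calc_biodiversity_alt
  rw [← List.foldl_map (f := String.toList), ← List.foldl_flatten]
  rw [pvA_foldl]
  by_cases h : (grid.map String.toList).flatten = []
  · simp [h, pvVal]
  · simp only [h, ite_false, pvB_parse]
    ring
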